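-- pv_equiv track=rewrite | github.com/Theodore-Jones-IT-Consulting/Estate-Static-CMS | listing_list_page.py | generate_pagination_links
-- ===== SOURCE A (Python) =====
-- def generate_pagination_links(current_page, total_pages, version_name):
--     links = []
--
--     # Define how many page links to show around the current page
--     num_links_around_current = 2
--
--     for page in range(1, total_pages + 1):
--         # Adjust URL for first page of "Most Recent"
--         page_link = 'index.html' if page == 1 and version_name == 'Most_Recent' else f'{version_name}_page_{page}.html'
--
--         # Always show the first and last pages
--         if page == 1 or page == total_pages:
--             links.append(f'<a href="{page_link}">{page}</a>')
--
--         # Show current page and num_links_around_current pages around it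
--         elif page >= current_page - num_links_around_current and page <= current_page + num_links_around_current:
--             if page == current_page:
--                 links.append(f'<span>{page}</span>')
--             else:
--                 links.append(f'<a href="{page_link}">{page}</a>')
--
--         # Show ellipses when there is a gap
--         elif page == current_page - num_links_around_current - 1 or page == current_page + num_links_around_current + 1:
--             links.append('...')
--
--     # "Previous" and "Next" buttons
--     prev_page = max(1, current_page - 1)
--     next_page = min(total_pages, current_page + 1)
--
--     prev_page_link = 'index.html' if prev_page == 1 and version_name == 'Most_Recent' else f'{version_name}_page_{prev_page}.html'
--     next_page_link = f'{version_name}_page_{next_page}.html'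
--
--     prev_link = f'<a href="{prev_page_link}">&laquo; Previous</a>' if current_page > 1 else ''
--     next_link = f'<a href="{next_page_link}">Next &raquo;</a>' if current_page < total_pages else ''
--
--     return prev_link + ' ' + ' '.join(links) + ' ' + next_link
-- ===== SOURCE B (Python) =====
-- def generate_pagination_links(current_page, total_pages, version_name):
--     # O(1): emit first page, left ellipsis, the +/-2 window clipped to the
--     # interior pages, right ellipsis and last page directly, no scan of all pages.
--     def url(p):
--         return 'index.html' if p == 1 and version_name == 'Most_Recent' else f'{version_name}_page_{p}.html'
--
--     def link(p):
--         return f'<a href="{url(p)}">{p}</a>'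
--
--     start = max(2, current_page - 2)
--     stop = min(total_pages - 1, current_page + 2)
--
--     parts = ([link(1)] if total_pages >= 1 else []) \
--         + (['...'] if 2 <= current_page - 3 <= total_pages - 1 else []) \
--         + [('<span>%d</span>' % p if p == current_page else link(p))
--            for p in range(start, stop + 1)] \
--         + (['...'] if 2 <= current_page + 3 <= total_pages - 1 else []) \
--         + ([link(total_pages)] if total_pages >= 2 else [])
--
--     prev_link = f'<a href="{url(max(1, current_page - 1))}">&laquo; Previous</a>' if current_page > 1 else ''
--     next_link = f'<a href="{version_name}_page_{min(total_pages, current_page + 1)}.html">Next &raquo;</a>' if current_page < total_pages else ''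
--     return prev_link + ' ' + ' '.join(parts) + ' ' + next_link
-- ===== Notes on version B (the rewrite author's own statement) =====
-- stated objective: faster
-- what changed: B emits the first page, left ellipsis, the clipped +/-2 window, right ellipsis and last page directly in O(1) instead of scanning and classifying every page from 1 to total_pages.
import Mathlib
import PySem

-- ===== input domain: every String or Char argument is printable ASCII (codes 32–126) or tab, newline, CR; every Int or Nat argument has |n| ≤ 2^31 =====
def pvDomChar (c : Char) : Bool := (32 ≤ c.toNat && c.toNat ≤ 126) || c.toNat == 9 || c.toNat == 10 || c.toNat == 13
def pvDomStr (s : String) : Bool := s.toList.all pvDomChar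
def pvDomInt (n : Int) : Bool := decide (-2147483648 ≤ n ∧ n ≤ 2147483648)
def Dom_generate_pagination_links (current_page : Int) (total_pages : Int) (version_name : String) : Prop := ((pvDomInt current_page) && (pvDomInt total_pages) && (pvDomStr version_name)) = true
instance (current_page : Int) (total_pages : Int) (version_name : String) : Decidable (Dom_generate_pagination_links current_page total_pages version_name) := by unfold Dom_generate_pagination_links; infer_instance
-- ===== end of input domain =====

-- B builds the pagination bar in O(1) — first page, left ellipsis, the clipped ±2 window,
-- right ellipsis, last page — instead of A's scan over every page from 1 to total_pages.

-- ===== PORT A =====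
def generate_pagination_links (current_page : Int) (total_pages : Int) (version_name : String) : String :=
  let links : List String := (PySem.List.pyRange 1 (total_pages + 1) 1).foldl
    (fun links page =>
      let page_link := if page = 1 ∧ version_name = "Most_Recent" then "index.html"
        else version_name ++ "_page_" ++ PySem.Int.toStr page ++ ".html"
      if page = 1 ∨ page = total_pages then
        links ++ ["<a href=\"" ++ page_link ++ "\">" ++ PySem.Int.toStr page ++ "</a>"]
      else if page ≥ current_page - 2 ∧ page ≤ current_page + 2 then
        (if page = current_page then links ++ ["<span>" ++ PySem.Int.toStr page ++ "</span>"]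
         else links ++ ["<a href=\"" ++ page_link ++ "\">" ++ PySem.Int.toStr page ++ "</a>"])
      else if page = current_page - 3 ∨ page = current_page + 3 then links ++ ["..."]
      else links) []
  let prev_page := max 1 (current_page - 1)
  let next_page := min total_pages (current_page + 1)
  let prev_page_link := if prev_page = 1 ∧ version_name = "Most_Recent" then "index.html"
    else version_name ++ "_page_" ++ PySem.Int.toStr prev_page ++ ".html"
  let next_page_link := version_name ++ "_page_" ++ PySem.Int.toStr next_page ++ ".html"
  let prev_link := if current_page > 1 then "<a href=\"" ++ prev_page_link ++ "\">&laquo; Previous</a>" else ""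
  let next_link := if current_page < total_pages then "<a href=\"" ++ next_page_link ++ "\">Next &raquo;</a>" else ""
  prev_link ++ " " ++ PySem.Str.join " " links ++ " " ++ next_link

-- ===== PORT B =====
def pvUrl (version_name : String) (p : Int) : String :=
  if p = 1 ∧ version_name = "Most_Recent" then "index.html"
  else version_name ++ "_page_" ++ PySem.Int.toStr p ++ ".html"

def pvLink (version_name : String) (p : Int) : String :=
  "<a href=\"" ++ pvUrl version_name p ++ "\">" ++ PySem.Int.toStr p ++ "</a>"

def generate_pagination_links_alt (current_page : Int) (total_pages : Int) (version_name : String) : String :=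
  let start := max 2 (current_page - 2)
  let stop := min (total_pages - 1) (current_page + 2)
  let parts : List String :=
    (if total_pages ≥ 1 then [pvLink version_name 1] else [])
    ++ (if 2 ≤ current_page - 3 ∧ current_page - 3 ≤ total_pages - 1 then ["..."] else [])
    ++ (PySem.List.pyRange start (stop + 1) 1).map (fun p =>
         if p = current_page then "<span>" ++ PySem.Int.toStr p ++ "</span>" else pvLink version_name p)
    ++ (if 2 ≤ current_page + 3 ∧ current_page + 3 ≤ total_pages - 1 then ["..."] else [])
    ++ (if total_pages ≥ 2 then [pvLink version_name total_pages] else [])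
  let prev_link := if current_page > 1 then
    "<a href=\"" ++ pvUrl version_name (max 1 (current_page - 1)) ++ "\">&laquo; Previous</a>" else ""
  let next_link := if current_page < total_pages then
    "<a href=\"" ++ (version_name ++ "_page_" ++ PySem.Int.toStr (min total_pages (current_page + 1)) ++ ".html") ++ "\">Next &raquo;</a>" else ""
  prev_link ++ " " ++ PySem.Str.join " " parts ++ " " ++ next_link

-- ===== PRECONDITION & SPEC =====
def Spec_generate_pagination_links (current_page : Int) (total_pages : Int) (version_name : String) (out : String) : Prop := out = generate_pagination_links_alt current_page total_pages version_name
instance (current_page : Int) (total_pages : Int) (version_name : String) (out : String) : Decidable (Spec_generate_pagination_links current_page total_pages version_name out) := by unfold Spec_generate_pagination_links; infer_instance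

-- ===== CLAIM (what is proved, stated in full; the proofs are below) =====
def Claim_equal_generate_pagination_links : Prop := ∀ (current_page : Int) (total_pages : Int) (version_name : String), Dom_generate_pagination_links current_page total_pages version_name → Spec_generate_pagination_links current_page total_pages version_name (generate_pagination_links current_page total_pages version_name)

-- ===== LEMMAS AND PROOFS =====

-- per-page emission of A's loop
def pvEntryA (cp tp : Int) (v : String) (page : Int) : List String :=
  if page = 1 ∨ page = tp then [pvLink v page]
  else if page ≥ cp - 2 ∧ page ≤ cp + 2 then
    (if page = cp then ["<span>" ++ PySem.Int.toStr page ++ "</span>"] else [pvLink v page])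
  else if page = cp - 3 ∨ page = cp + 3 then ["..."]
  else []

-- interior classifier: on pages 2 … tp-1, A emits exactly the [cp-3, cp+3] window
def pvH (cp : Int) (v : String) (p : Int) : String :=
  if p ≥ cp - 2 ∧ p ≤ cp + 2 then
    (if p = cp then "<span>" ++ PySem.Int.toStr p ++ "</span>" else pvLink v p)
  else "..."

lemma pvFoldA_eq (cp tp : Int) (v : String) (l : List Int) (acc : List String) :
    l.foldl (fun links page =>
      let page_link := if page = 1 ∧ v = "Most_Recent" then "index.html"
        else v ++ "_page_" ++ PySem.Int.toStr page ++ ".html"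
      if page = 1 ∨ page = tp then
        links ++ ["<a href=\"" ++ page_link ++ "\">" ++ PySem.Int.toStr page ++ "</a>"]
      else if page ≥ cp - 2 ∧ page ≤ cp + 2 then
        (if page = cp then links ++ ["<span>" ++ PySem.Int.toStr page ++ "</span>"]
         else links ++ ["<a href=\"" ++ page_link ++ "\">" ++ PySem.Int.toStr page ++ "</a>"])
      else if page = cp - 3 ∨ page = cp + 3 then links ++ ["..."]
      else links) acc
    = acc ++ l.flatMap (pvEntryA cp tp v) := by
  have hbody : (fun (links : List String) (page : Int) =>
      let page_link := if page = 1 ∧ v = "Most_Recent" then "index.html"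
        else v ++ "_page_" ++ PySem.Int.toStr page ++ ".html"
      if page = 1 ∨ page = tp then
        links ++ ["<a href=\"" ++ page_link ++ "\">" ++ PySem.Int.toStr page ++ "</a>"]
      else if page ≥ cp - 2 ∧ page ≤ cp + 2 then
        (if page = cp then links ++ ["<span>" ++ PySem.Int.toStr page ++ "</span>"]
         else links ++ ["<a href=\"" ++ page_link ++ "\">" ++ PySem.Int.toStr page ++ "</a>"])
      else if page = cp - 3 ∨ page = cp + 3 then links ++ ["..."]
      else links)
      = fun links page => links ++ pvEntryA cp tp v page := by
    funext links page
    simp only [pvEntryA, pvLink, pvUrl]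
    split_ifs <;> simp
  rw [hbody, PySem.List.foldl_append_eq_flatMap]

lemma pvFlatMap_window {β : Type} (h : Int → β) (lo hi : Int) :
    ∀ (n : Nat) (a b : Int), (b - a).toNat = n →
    (PySem.List.pyRange a b 1).flatMap (fun p => if lo ≤ p ∧ p ≤ hi then [h p] else [])
      = (PySem.List.pyRange (max a lo) (min b (hi + 1)) 1).map h := by
  intro n
  induction n with
  | zero =>
    intro a b hn
    rw [PySem.List.pyRange_one_eq_nil (by omega), PySem.List.pyRange_one_eq_nil (by omega)]
    rfl
  | succ n ih =>
    intro a b hn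
    have hab : a < b := by omega
    rw [PySem.List.pyRange_one_cons hab, List.flatMap_cons, ih (a + 1) b (by omega)]
    by_cases h1 : lo ≤ a ∧ a ≤ hi
    · rw [if_pos h1]
      rw [show max a lo = a from by omega, show max (a + 1) lo = a + 1 from by omega,
        PySem.List.pyRange_one_cons (show a < min b (hi + 1) by omega), List.map_cons]
      rfl
    · rw [if_neg h1, List.nil_append]
      by_cases h2 : a < lo
      · rw [show max (a + 1) lo = max a lo from by omega]
      · rw [PySem.List.pyRange_one_eq_nil (by omega), PySem.List.pyRange_one_eq_nil (by omega)]

lemma pvEntry_interior (cp tp : Int) (v : String) (p : Int) (h2 : 2 ≤ p) (hlt : p < tp) :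
    pvEntryA cp tp v p = if cp - 3 ≤ p ∧ p ≤ cp + 3 then [pvH cp v p] else [] := by
  unfold pvEntryA pvH
  split_ifs <;> first | rfl | omega

lemma pvParts_eq (cp tp : Int) (v : String) :
    (PySem.List.pyRange 1 (tp + 1) 1).flatMap (pvEntryA cp tp v)
    = (if tp ≥ 1 then [pvLink v 1] else [])
      ++ (if 2 ≤ cp - 3 ∧ cp - 3 ≤ tp - 1 then ["..."] else [])
      ++ (PySem.List.pyRange (max 2 (cp - 2)) (min (tp - 1) (cp + 2) + 1) 1).map (fun p =>
           if p = cp then "<span>" ++ PySem.Int.toStr p ++ "</span>" else pvLink v p)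
      ++ (if 2 ≤ cp + 3 ∧ cp + 3 ≤ tp - 1 then ["..."] else [])
      ++ (if tp ≥ 2 then [pvLink v tp] else []) := by
  by_cases htp0 : tp ≤ 0
  · rw [PySem.List.pyRange_one_eq_nil (by omega : tp + 1 ≤ (1:Int)),
      PySem.List.pyRange_one_eq_nil (by omega : min (tp-1) (cp+2) + 1 ≤ max 2 (cp-2)),
      if_neg (by omega), if_neg (by omega), if_neg (by omega), if_neg (by omega)]
    simp
  · by_cases htp1 : tp = 1
    · subst htp1
      rw [PySem.List.pyRange_one_cons (by omega : (1:Int) < 1 + 1),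
        PySem.List.pyRange_one_eq_nil (by omega : (1:Int) + 1 ≤ 1 + 1),
        PySem.List.pyRange_one_eq_nil (by omega : min ((1:Int)-1) (cp+2) + 1 ≤ max 2 (cp-2)),
        if_pos (by omega), if_neg (by omega), if_neg (by omega), if_neg (by omega)]
      simp [pvEntryA]
    · -- tp ≥ 2
      have htp2 : 2 ≤ tp := by omega
      rw [PySem.List.pyRange_one_append 1 2 (tp + 1) (by omega) (by omega),
        PySem.List.pyRange_one_append 2 tp (tp + 1) (by omega) (by omega),
        PySem.List.pyRange_one_cons (by omega : (1:Int) < 2),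
        PySem.List.pyRange_one_eq_nil (by omega : (2:Int) ≤ 1 + 1),
        PySem.List.pyRange_one_singleton]
      rw [List.flatMap_append, List.flatMap_append, List.flatMap_cons, List.flatMap_nil,
        List.flatMap_cons, List.flatMap_nil]
      have hfirst : pvEntryA cp tp v 1 = [pvLink v 1] := by
        unfold pvEntryA; rw [if_pos (Or.inl rfl)]
      have hlast : pvEntryA cp tp v tp = [pvLink v tp] := by
        unfold pvEntryA; rw [if_pos (Or.inr rfl)]
      have hmid : (PySem.List.pyRange 2 tp 1).flatMap (pvEntryA cp tp v)
          = (PySem.List.pyRange 2 tp 1).flatMap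
            (fun p => if cp - 3 ≤ p ∧ p ≤ cp + 3 then [pvH cp v p] else []) := by
        apply List.flatMap_congr
        intro p hp
        have hb := PySem.List.mem_pyRange_one.mp hp
        exact pvEntry_interior cp tp v p (by omega) (by omega)
      rw [hfirst, hlast, hmid,
        pvFlatMap_window (pvH cp v) (cp - 3) (cp + 3) (tp - 2).toNat 2 tp (by omega)]
      rw [if_pos (by omega : tp ≥ (1:Int)), if_pos (by omega : tp ≥ (2:Int))]
      rw [show min (tp - 1) (cp + 2) + 1 = min tp (cp + 3) from by omega,
        show cp + 3 + 1 = cp + 4 from by omega]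
      by_cases hMN : min tp (cp + 4) ≤ max 2 (cp - 3)
      · rw [PySem.List.pyRange_one_eq_nil hMN,
          PySem.List.pyRange_one_eq_nil (by omega : min tp (cp+3) ≤ max 2 (cp-2)),
          if_neg (by omega), if_neg (by omega)]
        simp
      · have h1 : max 2 (cp - 3) ≤ max 2 (cp - 2) := by omega
        have h2 : max 2 (cp - 2) ≤ min tp (cp + 3) := by omega
        have h3 : min tp (cp + 3) ≤ min tp (cp + 4) := by omega
        rw [PySem.List.pyRange_one_append (max 2 (cp-3)) (max 2 (cp-2)) (min tp (cp+4)) h1 (le_trans h2 h3),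
          PySem.List.pyRange_one_append (max 2 (cp-2)) (min tp (cp+3)) (min tp (cp+4)) h2 h3,
          List.map_append, List.map_append]
        have hE1 : (PySem.List.pyRange (max 2 (cp-3)) (max 2 (cp-2)) 1).map (pvH cp v)
            = (if 2 ≤ cp - 3 ∧ cp - 3 ≤ tp - 1 then ["..."] else []) := by
          by_cases he : 2 ≤ cp - 3 ∧ cp - 3 ≤ tp - 1
          · rw [if_pos he, show max 2 (cp-3) = cp - 3 from by omega,
              show max 2 (cp-2) = (cp - 3) + 1 from by omega,
              PySem.List.pyRange_one_singleton, List.map_singleton]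
            unfold pvH; rw [if_neg (by omega)]
          · rw [if_neg he, PySem.List.pyRange_one_eq_nil (by omega), List.map_nil]
        have hE2 : (PySem.List.pyRange (min tp (cp+3)) (min tp (cp+4)) 1).map (pvH cp v)
            = (if 2 ≤ cp + 3 ∧ cp + 3 ≤ tp - 1 then ["..."] else []) := by
          by_cases he : 2 ≤ cp + 3 ∧ cp + 3 ≤ tp - 1
          · rw [if_pos he, show min tp (cp+3) = cp + 3 from by omega,
              show min tp (cp+4) = (cp + 3) + 1 from by omega,
              PySem.List.pyRange_one_singleton, List.map_singleton]
            unfold pvH; rw [if_neg (by omega)]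
          · rw [if_neg he, PySem.List.pyRange_one_eq_nil (by omega), List.map_nil]
        have hMid : (PySem.List.pyRange (max 2 (cp-2)) (min tp (cp+3)) 1).map (pvH cp v)
            = (PySem.List.pyRange (max 2 (cp-2)) (min tp (cp+3)) 1).map (fun p =>
                if p = cp then "<span>" ++ PySem.Int.toStr p ++ "</span>" else pvLink v p) := by
          apply List.map_congr_left
          intro p hp
          have hb := PySem.List.mem_pyRange_one.mp hp
          unfold pvH; rw [if_pos (by omega)]
        rw [hE1, hE2, hMid]
        simp [List.append_assoc]

theorem generate_pagination_links_spec : Claim_equal_generate_pagination_links := by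
  intro cp tp v _
  unfold Spec_generate_pagination_links generate_pagination_links generate_pagination_links_alt
  dsimp only
  rw [pvFoldA_eq, List.nil_append, pvParts_eq]
  simp only [pvUrl]
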